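-- pv_equiv track=rewrite | github.com/Andreeaxhx/CN | tema6/tema6.py | matrix_B
-- ===== SOURCE A (Python) =====
-- def matrix_B(m, n, x):
--     B = []
--     for index in range(0, m + 1):
--         B.append([])
--         for jndex in range(0, m + 1):
--             suma = 0
--             for i in range(0, n):
--                 suma += x[i] ** (index + jndex)
--             B[index].append(suma)
--     return B
-- ===== SOURCE B (Python) =====
-- def matrix_B(m, n, x):
--     if m < 0:
--         return []
--     vals = [x[i] for i in range(n)]
--     # power sums S[e] = sum(v**e for v in vals), maintained incrementally
--     S = []
--     pw = [1] * len(vals)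
--     for _ in range(2 * m + 1):
--         S.append(sum(pw))
--         pw = [p * v for p, v in zip(pw, vals)]
--     return [[S[i + j] for j in range(m + 1)] for i in range(m + 1)]
-- ===== Notes on version B (the rewrite author's own statement) =====
-- stated objective: alternative
-- what changed: Precompute the power sums S[e] = sum(x[k]**e) for e = 0..2m in one incremental pass (multiplying a running power vector), then fill B[i][j] = S[i+j], instead of recomputing each entry's power sum from scratch; intended as faster (a timing run measured 54-108x at n=256 where both finished) but at the largest sizes both are dominated by the huge-integer output and that run could not confirm it.
import Mathlib
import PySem

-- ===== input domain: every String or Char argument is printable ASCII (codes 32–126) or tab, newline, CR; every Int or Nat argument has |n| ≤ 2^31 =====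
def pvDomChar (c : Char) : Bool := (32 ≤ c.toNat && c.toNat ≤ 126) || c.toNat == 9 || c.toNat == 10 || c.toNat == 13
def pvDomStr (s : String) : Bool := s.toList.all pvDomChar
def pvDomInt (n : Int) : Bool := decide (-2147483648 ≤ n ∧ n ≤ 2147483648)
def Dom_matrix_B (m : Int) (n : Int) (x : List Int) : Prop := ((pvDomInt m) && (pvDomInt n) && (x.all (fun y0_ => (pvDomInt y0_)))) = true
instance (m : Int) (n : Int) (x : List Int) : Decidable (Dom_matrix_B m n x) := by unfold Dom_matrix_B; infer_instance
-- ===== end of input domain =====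

-- B precomputes the power sums S[e] = Σ_k x[k]^e once (incrementally) and fills B[i][j] = S[i+j],
-- a different algorithm from A's per-entry summation of powers.

-- ===== PORT A =====
def matrix_B (m : Int) (n : Int) (x : List Int) : List (List Int) :=
  (PySem.List.pyRange 0 (m + 1) 1).foldl
    (fun B index =>
      B ++ [ (PySem.List.pyRange 0 (m + 1) 1).foldl
        (fun row jndex =>
          row ++ [ (PySem.List.pyRange 0 n 1).foldl
            (fun suma i => suma + PySem.List.pyGetD x i 0 ^ (index + jndex).toNat) 0 ])
        [] ])
    []

-- ===== PORT B =====
def matrix_B_alt (m : Int) (n : Int) (x : List Int) : List (List Int) :=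
  if m < 0 then []
  else
    let vals := (PySem.List.pyRange 0 n 1).map (fun i => PySem.List.pyGetD x i 0)
    let Spw := (PySem.List.pyRange 0 (2 * m + 1) 1).foldl
      (fun (st : List Int × List Int) _ =>
        (st.1 ++ [st.2.sum], List.zipWith (· * ·) st.2 vals))
      ([], vals.map (fun _ => 1))
    let S := Spw.1
    (PySem.List.pyRange 0 (m + 1) 1).map (fun i =>
      (PySem.List.pyRange 0 (m + 1) 1).map (fun j => PySem.List.pyGetD S (i + j) 0))

-- ===== PRECONDITION & SPEC =====
-- Pre_ excludes exactly the inputs where A raises IndexError: m ≥ 0 (the loops run) and n greater than len(x).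
def Pre_matrix_B (m : Int) (n : Int) (x : List Int) : Prop := m < 0 ∨ n ≤ (x.length : Int)
instance (m : Int) (n : Int) (x : List Int) : Decidable (Pre_matrix_B m n x) := by unfold Pre_matrix_B; infer_instance

def pvWitness_matrix_B : Int × Int × List Int := (2, 2, [3, -5])

def Spec_matrix_B (m : Int) (n : Int) (x : List Int) (out : List (List Int)) : Prop := out = matrix_B_alt m n x
instance (m : Int) (n : Int) (x : List Int) (out : List (List Int)) : Decidable (Spec_matrix_B m n x out) := by unfold Spec_matrix_B; infer_instance

-- ===== CLAIM (what is proved, stated in full; the proofs are below) =====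
def Claim_equal_matrix_B : Prop := ∀ (m : Int) (n : Int) (x : List Int), Dom_matrix_B m n x → Pre_matrix_B m n x → Spec_matrix_B m n x (matrix_B m n x)

-- ===== LEMMAS AND PROOFS =====

-- power sum Σ v^e over vals
def psum (vals : List Int) (e : Nat) : Int := (vals.map (· ^ e)).sum

theorem zipWith_pow (vals : List Int) (t : Nat) :
    List.zipWith (· * ·) (vals.map (· ^ t)) vals = vals.map (· ^ (t + 1)) := by
  induction vals with
  | nil => rfl
  | cons v vs ih => simp [ih, pow_succ]

theorem loopS (vals : List Int) {α : Type} (L : List α) : ∀ (t : Nat) (S0 : List Int),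
    L.foldl (fun (st : List Int × List Int) _ =>
        (st.1 ++ [st.2.sum], List.zipWith (· * ·) st.2 vals))
      (S0, vals.map (· ^ t))
    = (S0 ++ (List.range L.length).map (fun k => psum vals (t + k)),
       vals.map (· ^ (t + L.length))) := by
  induction L with
  | nil => intro t S0; simp
  | cons a L ih =>
    intro t S0
    simp only [List.foldl_cons, zipWith_pow]
    rw [ih (t + 1) (S0 ++ [(vals.map (· ^ t)).sum])]
    rw [List.length_cons, List.range_succ_eq_map, List.map_cons, List.map_map,
        List.append_assoc, List.singleton_append]
    have h2 : t + (L.length + 1) = t + 1 + L.length := by omega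
    rw [h2]
    simp only [Prod.mk.injEq, List.append_cancel_left_eq, List.cons.injEq]
    refine ⟨⟨by simp [psum], ?_⟩, trivial⟩
    apply List.map_congr_left
    intro k _
    simp only [Function.comp_def]
    congr 1
    omega

theorem matrix_B_eq (m n : Int) (x : List Int) :
    matrix_B m n x =
      (PySem.List.pyRange 0 (m + 1) 1).map (fun i =>
        (PySem.List.pyRange 0 (m + 1) 1).map (fun j =>
          psum ((PySem.List.pyRange 0 n 1).map (fun i => PySem.List.pyGetD x i 0)) (i + j).toNat)) := by
  unfold matrix_B
  rw [PySem.List.foldl_append_singleton_eq_map]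
  simp only [List.nil_append]
  apply List.map_congr_left; intro i _
  rw [PySem.List.foldl_append_singleton_eq_map]
  simp only [List.nil_append]
  apply List.map_congr_left; intro j _
  rw [PySem.List.foldl_add]
  simp [psum, List.map_map, Function.comp_def]

theorem matrix_B_spec' (m n : Int) (x : List Int) : matrix_B m n x = matrix_B_alt m n x := by
  by_cases hm : m < 0
  · unfold matrix_B_alt
    rw [matrix_B_eq, if_pos hm,
      show PySem.List.pyRange 0 (m + 1) 1 = [] from PySem.List.pyRange_one_eq_nil (by omega)]
    simp
  · unfold matrix_B_alt
    rw [if_neg hm]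
    set vals := (PySem.List.pyRange 0 n 1).map (fun i => PySem.List.pyGetD x i 0) with hvals
    have h1 : vals.map (fun _ => (1 : Int)) = vals.map (· ^ (0 : Nat)) := by simp
    simp only [h1]
    rw [loopS vals (PySem.List.pyRange 0 (2 * m + 1) 1) 0 []]
    simp only [List.nil_append]
    rw [matrix_B_eq]
    apply List.map_congr_left; intro i hi
    apply List.map_congr_left; intro j hj
    rw [PySem.List.mem_pyRange_one] at hi hj
    have hij : (0:Int) ≤ i + j := by omega
    have : i + j = ((i + j).toNat : Int) := by omega
    rw [this, PySem.List.pyGetD_natCast, PySem.List.getD_map_range]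
    · show psum vals _ = psum vals _
      congr 1
      omega
    · rw [PySem.List.length_pyRange_one]; omega

-- ===== VERDICT (by name: the statement is the Claim_ definition above) =====
theorem matrix_B_spec : Claim_equal_matrix_B := by
  intro m n x _ _
  exact matrix_B_spec' m n x
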